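-- pv_equiv track=rewrite | github.com/IterUp/advent-of-code | 2021/day10.py | syntax_check2
-- ===== SOURCE A (Python) =====
-- matched = {")": "(", "]": "[", "}": "{", ">": "<"}
--
-- scores2 = {"(": 1, "[": 2, "{": 3, "<": 4}
--
-- def syntax_check2(line):
--     stack = []
--     for c in line:
--         if c in matched:
--             if stack and stack[-1] == matched[c]:
--                 stack.pop()
--             else:
--                 return 0
--         else:
--             stack.append(c)
--     return sum(scores2[c] * 5**i for i, c in enumerate(stack))
-- ===== SOURCE B (Python) =====
-- matched = {")": "(", "]": "[", "}": "{", ">": "<"}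
--
-- scores2 = {"(": 1, "[": 2, "{": 3, "<": 4}
--
-- def syntax_check2(line):
--     stack = []
--     total = 0
--     p = 1  # always 5 ** len(stack)
--     for c in line:
--         if c in matched:
--             if not stack or stack[-1] != matched[c]:
--                 return 0
--             p //= 5
--             total -= scores2[stack.pop()] * p
--         else:
--             total += scores2.get(c, 0) * p
--             stack.append(c)
--             p *= 5
--     return total
-- ===== Notes on version B (the rewrite author's own statement) =====
-- stated objective: alternative
-- what changed: B fuses the scoring into the matching loop, maintaining a running total and a place value p = 5**len(stack) updated at each push/pop, so the separate enumerate/5**i summation pass over the final stack disappears.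
-- outside the precondition, e.g. on syntax_check2('a())'): A returns 0, B returns 0
import Mathlib
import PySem

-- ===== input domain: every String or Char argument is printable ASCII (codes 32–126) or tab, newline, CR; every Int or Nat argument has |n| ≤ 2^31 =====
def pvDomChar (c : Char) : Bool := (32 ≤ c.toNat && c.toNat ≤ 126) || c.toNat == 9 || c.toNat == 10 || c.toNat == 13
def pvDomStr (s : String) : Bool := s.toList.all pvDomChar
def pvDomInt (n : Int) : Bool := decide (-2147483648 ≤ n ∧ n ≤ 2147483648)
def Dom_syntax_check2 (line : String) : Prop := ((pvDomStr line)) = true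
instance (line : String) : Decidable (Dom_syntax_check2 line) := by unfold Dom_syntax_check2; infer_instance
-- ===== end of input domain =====

-- B fuses the autocomplete scoring into the matching loop with a running total and
-- place value 5^depth; return-value equivalence with A is proved on bracket-only lines.

-- ===== PORT A =====
-- matched[c] lookup: some opener if c is a closer, none otherwise
def pvMatched (c : Char) : Option Char :=
  if c = ')' then some '(' else if c = ']' then some '[' else
  if c = '}' then some '{' else if c = '>' then some '<' else none

-- scores2[c]; default 0 is scores2.get(c, 0) in B, and in A it is only reached
-- outside Pre_syntax_check2 (where Python A raises KeyError)
def pvScore2 (c : Char) : Int :=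
  if c = '(' then 1 else if c = '[' then 2 else if c = '{' then 3 else
  if c = '<' then 4 else 0

-- the for-loop of A: stack kept head-is-top; none encodes the early `return 0`
def pvLoopA : List Char → List Char → Option (List Char)
  | [], stack => some stack
  | c :: cs, stack =>
    match pvMatched c with
    | some m =>
      match stack with
      | t :: rest => if t = m then pvLoopA cs rest else none
      | [] => none
    | none => pvLoopA cs (c :: stack)

def syntax_check2 (line : String) : Int :=
  match pvLoopA line.toList [] with
  | none => 0
  | some stack =>
    -- sum(scores2[c] * 5**i for i, c in enumerate(stack)); Python's stack is
    -- bottom-first, so enumerate runs over our list reversed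
    (stack.reverse.zipIdx.map (fun p => pvScore2 p.1 * 5 ^ p.2)).sum

-- ===== PORT B =====
-- fused loop: total and place value p = 5 ^ stack depth maintained incrementally
def pvLoopB : List Char → List Char → Int → Int → Int
  | [], _, total, _ => total
  | c :: cs, stack, total, p =>
    match pvMatched c with
    | some m =>
      match stack with
      | t :: rest => if t = m then pvLoopB cs rest (total - pvScore2 t * (p / 5)) (p / 5) else 0
      | [] => 0
    | none => pvLoopB cs (c :: stack) (total + pvScore2 c * p) (p * 5)

def syntax_check2_alt (line : String) : Int :=
  pvLoopB line.toList [] 0 1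

-- ===== PRECONDITION & SPEC =====
-- Pre_ admits bracket-only lines plus lines that are provably corrupt (a closer at the
-- start, or a closer right after a non-closer that does not match it, which forces A to
-- return 0); it excludes remaining lines with stray non-bracket characters, on which A
-- raises KeyError whenever a stray character is left on the stack and otherwise returns
-- an accidental 0 that is not claimed here (B returns the same 0 on those too).
def pvIsBracket (c : Char) : Bool :=
  c = '(' || c = ')' || c = '[' || c = ']' || c = '{' || c = '}' || c = '<' || c = '>'
def pvIsCloser (c : Char) : Bool := c = ')' || c = ']' || c = '}' || c = '>'
def pvForcedPair (l : List Char) : Bool :=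
  (l.zip l.tail).any (fun p => pvIsCloser p.2 && !pvIsCloser p.1 && !(pvMatched p.2 == some p.1))
def pvStartsWithCloser : List Char → Bool
  | [] => false
  | c :: _ => pvIsCloser c
def Pre_syntax_check2 (line : String) : Prop :=
  (line.toList.all pvIsBracket || pvStartsWithCloser line.toList || pvForcedPair line.toList) = true
instance (line : String) : Decidable (Pre_syntax_check2 line) := by
  unfold Pre_syntax_check2; infer_instance
def pvWitness_syntax_check2 : String := "(["

def Spec_syntax_check2 (line : String) (out : Int) : Prop := out = syntax_check2_alt line
instance (line : String) (out : Int) : Decidable (Spec_syntax_check2 line out) := by unfold Spec_syntax_check2; infer_instance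

-- ===== CLAIM (what is proved, stated in full; the proofs are below) =====
def Claim_equal_syntax_check2 : Prop := ∀ (line : String), Dom_syntax_check2 line → Pre_syntax_check2 line → Spec_syntax_check2 line (syntax_check2 line)

-- ===== LEMMAS AND PROOFS =====

-- the autocomplete score of a stack (head = top): weight 5^i, bottom index 0
def pvS : List Char → Int
  | [] => 0
  | c :: st => pvScore2 c * 5 ^ st.length + pvS st

theorem pvSumA_eq_pvS (st : List Char) :
    (st.reverse.zipIdx.map (fun p => pvScore2 p.1 * 5 ^ p.2)).sum = pvS st := by
  induction st with
  | nil => simp [pvS]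
  | cons c st ih =>
    simp only [List.reverse_cons, List.zipIdx_append, List.map_append, List.sum_append,
      pvS] at *
    simp [ih]
    ring

theorem pvLoopB_eq (cs : List Char) : ∀ (st : List Char),
    pvLoopB cs st (pvS st) (5 ^ st.length) =
      (match pvLoopA cs st with
       | none => 0
       | some st' => pvS st') := by
  induction cs with
  | nil => intro st; simp [pvLoopA, pvLoopB]
  | cons c cs ih =>
    intro st
    cases hm : pvMatched c with
    | none =>
      have h1 : pvS st + pvScore2 c * 5 ^ st.length = pvS (c :: st) := by
        simp [pvS]; ring
      have h2 : (5 : Int) ^ st.length * 5 = 5 ^ (c :: st).length := by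
        simp [pow_succ]
      simp only [pvLoopA, pvLoopB, hm, h1, h2]
      exact ih (c :: st)
    | some m =>
      cases st with
      | nil => simp [pvLoopA, pvLoopB, hm]
      | cons t rest =>
        by_cases ht : t = m
        · subst ht
          have hp : (5 : Int) ^ (t :: rest).length / 5 = 5 ^ rest.length := by
            simp [pow_succ]
          have hs : pvS (t :: rest) - pvScore2 t * 5 ^ rest.length = pvS rest := by
            simp [pvS]
          simp only [pvLoopA, pvLoopB, hm, hp, hs]
          exact ih rest
        · simp only [pvLoopA, pvLoopB, hm, if_neg ht]

-- ===== VERDICT (by name: the statement is the Claim_ definition above) =====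
theorem syntax_check2_spec : Claim_equal_syntax_check2 := by
  intro line _ _
  unfold Spec_syntax_check2 syntax_check2 syntax_check2_alt
  have h := pvLoopB_eq line.toList []
  simp only [pvS, List.length_nil, pow_zero] at h
  rw [h]
  cases hA : pvLoopA line.toList [] with
  | none => simp
  | some st => simp [pvSumA_eq_pvS]
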